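-- pv_equiv track=rewrite | github.com/gwon477/TIL | 유형별 문제 풀이/구현/최고의 집합.py | solution
-- ===== SOURCE A (Python) =====
-- def solution(n,s):
--     answer = []
--
--     if s < n:
--         return [-1]
--
--     target = s//n
--     ano = s%n
--
--     answer = [target] * n
--
--     for _ in range(ano):
--         answer[_] += 1
--
--     answer.sort()
--     return answer
-- ===== SOURCE B (Python) =====
-- def solution(n, s):
--     if s < n:
--         return [-1]
--     out = []
--     remaining = s
--     k = n
--     while k > 0:
--         m = -(-remaining // k)  # ceiling of remaining / k: the current largest part
--         out.append(m)
--         remaining -= m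
--         k -= 1
--     out.reverse()
--     return out
-- ===== Notes on version B (the rewrite author's own statement) =====
-- stated objective: alternative
-- what changed: B builds the set greedily one element at a time: each step takes the ceiling of remaining/k as the current largest part and recurses on the reduced sum, instead of A's fill-with-quotient array, increment-a-prefix loop, and final sort.
-- outside the precondition, e.g. on solution(0, 5): A raises ZeroDivisionError, B returns []
import Mathlib
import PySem

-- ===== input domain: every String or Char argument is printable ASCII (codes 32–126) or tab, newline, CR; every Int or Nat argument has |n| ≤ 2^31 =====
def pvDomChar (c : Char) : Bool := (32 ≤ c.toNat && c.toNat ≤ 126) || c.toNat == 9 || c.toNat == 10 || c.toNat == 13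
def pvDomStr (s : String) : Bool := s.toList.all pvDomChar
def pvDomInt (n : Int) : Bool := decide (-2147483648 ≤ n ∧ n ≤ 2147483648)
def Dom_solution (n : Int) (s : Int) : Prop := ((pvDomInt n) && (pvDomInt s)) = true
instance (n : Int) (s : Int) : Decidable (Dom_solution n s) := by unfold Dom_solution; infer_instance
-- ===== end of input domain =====

-- B replaces A's fill/increment/sort by a greedy one-pass peeling: each step emits
-- the current maximum part, ceil(remaining/k), and recurses (return-value equivalence).

-- ===== PORT A =====
def solution (n : Int) (s : Int) : List Int :=
  if s < n then [-1]
  else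
    let target := PySem.Int.floordiv s n
    let ano := PySem.Int.mod s n
    let answer := List.replicate n.toNat target
    let answer :=
      (PySem.List.pyRange 0 ano 1).foldl
        (fun acc i => PySem.List.pySetD acc i (PySem.List.pyGetD acc i 0 + 1)) answer
    PySem.List.sorted answer (fun x => x) false

-- ===== PORT B =====
-- the while loop of Source B: state (k, remaining, out); appends ceil(remaining/k) each turn
def solutionAltLoop (k : Int) (remaining : Int) (out : List Int) : List Int :=
  if 0 < k then
    let m := -(PySem.Int.floordiv (-remaining) k)
    solutionAltLoop (k - 1) (remaining - m) (out ++ [m])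
  else out
termination_by k.toNat
decreasing_by omega

def solution_alt (n : Int) (s : Int) : List Int :=
  if s < n then [-1]
  else (solutionAltLoop n s []).reverse

-- ===== PRECONDITION & SPEC =====
-- Pre_ excludes only n = 0 with s ≥ 0, where Python A raises ZeroDivisionError.
def Pre_solution (n : Int) (s : Int) : Prop := n ≠ 0 ∨ s < 0
instance (n : Int) (s : Int) : Decidable (Pre_solution n s) := by unfold Pre_solution; infer_instance
def pvWitness_solution : Int × Int := (3, 11)

def Spec_solution (n : Int) (s : Int) (out : List Int) : Prop := out = solution_alt n s
instance (n : Int) (s : Int) (out : List Int) : Decidable (Spec_solution n s out) := by unfold Spec_solution; infer_instance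

-- ===== CLAIM (what is proved, stated in full; the proofs are below) =====
def Claim_equal_solution : Prop := ∀ (n : Int) (s : Int), Dom_solution n s → Pre_solution n s → Spec_solution n s (solution n s)

-- ===== LEMMAS AND PROOFS =====

-- A side: setting the element just past the `u`-block of `[u]*a ++ [t]*b` to `u` grows the block
lemma set_boundary (t u : Int) (a b : Nat) (hb : 0 < b) :
    (List.replicate a u ++ List.replicate b t).set a u
      = List.replicate (a + 1) u ++ List.replicate (b - 1) t := by
  apply List.ext_getElem
  · simp; omega
  · intro i h1 h2
    simp only [List.getElem_set, List.getElem_append, List.length_replicate,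
      List.getElem_replicate]
    split_ifs <;> first | rfl | omega

-- A side: the increment loop turns the first `a` copies of `t` into `t+1`
lemma loop_eq (t : Int) (a m : Nat) (h : a ≤ m) :
    (PySem.List.pyRange 0 (a : Int) 1).foldl
        (fun acc i => PySem.List.pySetD acc i (PySem.List.pyGetD acc i 0 + 1))
        (List.replicate m t)
      = List.replicate a (t + 1) ++ List.replicate (m - a) t := by
  induction a with
  | zero => simp [PySem.List.pyRange_one_eq_nil]
  | succ k ih =>
    have hsplit : PySem.List.pyRange 0 ((k + 1 : Nat) : Int) 1
        = PySem.List.pyRange 0 (k : Int) 1 ++ [(k : Int)] := by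
      push_cast
      exact PySem.List.pyRange_one_succ_right (by omega)
    rw [hsplit, List.foldl_append, ih (by omega)]
    simp only [List.foldl_cons, List.foldl_nil]
    have hget : PySem.List.pyGetD
        (List.replicate k (t + 1) ++ List.replicate (m - k) t) (k : Int) 0 = t := by
      rw [PySem.List.pyGetD_natCast]
      rw [List.getD_eq_getElem?_getD, List.getElem?_append_right (by simp)]
      simp [show 0 < m - k from by omega]
    rw [hget, PySem.List.pySetD_natCast, set_boundary t (t + 1) k (m - k) (by omega)]
    congr 1

-- A side: sorting `[t+1]*a ++ [t]*b` gives `[t]*b ++ [t+1]*a`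
lemma sorted_two_blocks (t : Int) (a b : Nat) :
    PySem.List.sorted (List.replicate a (t + 1) ++ List.replicate b t) (fun x => x) false
      = List.replicate b t ++ List.replicate a (t + 1) := by
  apply PySem.List.sorted_id_eq_of_perm_of_pairwise
  · exact List.perm_append_comm
  · apply List.pairwise_append.mpr
    refine ⟨?_, ?_, ?_⟩
    · exact List.pairwise_replicate.mpr (Or.inr le_rfl)
    · exact List.pairwise_replicate.mpr (Or.inr le_rfl)
    · intro x hx y hy
      rw [List.eq_of_mem_replicate hx, List.eq_of_mem_replicate hy]
      omega

-- B side: peeling ceilings from q*k + r appends [q+1]*r then [q]*(k-r)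
lemma altLoop_eq (k : Nat) (q : Int) (r : Nat) (out : List Int)
    (h : r < k ∨ r = 0) :
    solutionAltLoop (k : Int) (q * k + r) out
      = out ++ List.replicate r (q + 1) ++ List.replicate (k - r) q := by
  induction k generalizing r out with
  | zero =>
    have hr : r = 0 := by omega
    subst hr
    rw [solutionAltLoop]
    simp
  | succ k ih =>
    rw [solutionAltLoop]
    have hk : (0 : Int) < ((k + 1 : Nat) : Int) := by push_cast; omega
    rw [if_pos hk]
    cases r with
    | zero =>
      have hm : -(PySem.Int.floordiv (-(q * ((k + 1 : Nat) : Int) + ((0:Nat) : Int)))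
          ((k + 1 : Nat) : Int)) = q := by
        rw [PySem.Int.neg_floordiv_neg_eq_iff_of_pos hk]
        push_cast
        constructor <;> nlinarith
      simp only [hm]
      have hk1 : ((k + 1 : Nat) : Int) - 1 = (k : Int) := by push_cast; ring
      have harg : q * ((k + 1 : Nat) : Int) + ((0:Nat) : Int) - q = q * (k : Int) + ((0:Nat) : Int) := by
        push_cast; ring
      rw [harg, hk1, ih 0 (out ++ [q]) (Or.inr rfl)]
      simp
      rw [← List.replicate_succ]
    | succ r' =>
      have hr' : r' < k := by omega
      have hm : -(PySem.Int.floordiv (-(q * ((k + 1 : Nat) : Int) + ((r' + 1 : Nat) : Int)))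
          ((k + 1 : Nat) : Int)) = q + 1 := by
        rw [PySem.Int.neg_floordiv_neg_eq_iff_of_pos hk]
        push_cast
        constructor <;> nlinarith [hr']
      simp only [hm]
      have hk1 : ((k + 1 : Nat) : Int) - 1 = (k : Int) := by push_cast; ring
      have harg : q * ((k + 1 : Nat) : Int) + ((r' + 1 : Nat) : Int) - (q + 1)
          = q * (k : Int) + ((r' : Nat) : Int) := by
        push_cast; ring
      rw [harg, hk1, ih r' (out ++ [q + 1]) (Or.inl hr')]
      have hsub : k + 1 - (r' + 1) = k - r' := by omega
      simp [hsub, List.replicate_succ]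

-- ===== VERDICT (by name: the statement is the Claim_ definition above) =====
theorem solution_spec : Claim_equal_solution := by
  intro n s _ hpre
  unfold Spec_solution solution solution_alt
  by_cases hlt : s < n
  · simp [hlt]
  · simp only [hlt, if_false]
    rcases lt_trichotomy n 0 with hn | hn | hn
    · -- n < 0 : both sides are []
      have hmod : PySem.Int.mod s n ≤ 0 ∧ n < PySem.Int.mod s n := by
        have hb := PySem.Int.mod_neg_bounds s hn
        omega
      have h1 : n.toNat = 0 := by omega
      rw [PySem.List.pyRange_one_eq_nil (by omega), h1]
      rw [solutionAltLoop]
      simp [hn.not_gt, PySem.List.sorted]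
    · rcases hpre with h | h
      · exact absurd hn h
      · omega
    · -- n > 0
      have hmodeq : PySem.Int.mod s n = s % n := PySem.Int.mod_eq_emod_of_pos hn
      have hm0 : 0 ≤ s % n := Int.emod_nonneg s (by omega)
      have hmn : s % n < n := Int.emod_lt_of_pos s hn
      have hcast : PySem.Int.mod s n = (((s % n).toNat : Nat) : Int) := by omega
      -- A side reduces to two blocks
      rw [hcast,
        loop_eq (PySem.Int.floordiv s n) (s % n).toNat n.toNat (by omega),
        sorted_two_blocks]
      -- B side: the greedy loop produces the reversed blocks
      have hdiveq : PySem.Int.floordiv s n = s / n := PySem.Int.floordiv_eq_ediv_of_pos hn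
      have hnn : ((n.toNat : Nat) : Int) = n := by omega
      have hrn : (((s % n).toNat : Nat) : Int) = s % n := by omega
      have hs : s = (s / n) * ((n.toNat : Nat) : Int) + (((s % n).toNat : Nat) : Int) := by
        rw [hnn, hrn, Int.mul_comm]
        exact (Int.mul_ediv_add_emod s n).symm
      have hB : solutionAltLoop n s [] = solutionAltLoop ((n.toNat : Nat) : Int)
          ((s / n) * ((n.toNat : Nat) : Int) + (((s % n).toNat : Nat) : Int)) [] := by
        rw [← hs]; congr 1; omega
      rw [hB, altLoop_eq n.toNat (s / n) (s % n).toNat [] (Or.inl (by omega))]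
      rw [hdiveq]
      simp [List.reverse_append]
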